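-- pv_equiv track=rewrite | github.com/Eric-Coutinho/Handwriting-Recognition | Processing/utils.py | getBackColors
-- ===== SOURCE A (Python) =====
-- def getBackColors(img, rects):
--     covered_area = set()
--     for rect in rects:
--         (x1, y1), (x2, y2) = rect
--         for y in range(y1, y2 + 1):
--             for x in range(x1, x2 + 1):
--                 covered_area.add((x, y))
--
--     unique_colors = {}
--     for y in range(len(img)):
--         row = img[y]
--         for x in range(len(row)):
--             if (x, y) not in covered_area:
--                 b, g, r = row[x]
--                 unique_colors[(b, g, r)] = True
--
--     return list(unique_colors.keys())
-- ===== SOURCE B (Python) =====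
-- def getBackColors(img, rects):
--     unique_colors = {}
--     for y in range(len(img)):
--         row = img[y]
--         for x in range(len(row)):
--             if not any(x1 <= x <= x2 and y1 <= y <= y2 for (x1, y1), (x2, y2) in rects):
--                 b, g, r = row[x]
--                 unique_colors[(b, g, r)] = True
--     return list(unique_colors.keys())
-- ===== Notes on version B (the rewrite author's own statement) =====
-- stated objective: simpler
-- what changed: Drops the precomputed covered_area set entirely: each pixel is tested for coverage on the fly with an inclusive bounds check against every rectangle, keeping only the order-preserving color dict.
import Mathlib
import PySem

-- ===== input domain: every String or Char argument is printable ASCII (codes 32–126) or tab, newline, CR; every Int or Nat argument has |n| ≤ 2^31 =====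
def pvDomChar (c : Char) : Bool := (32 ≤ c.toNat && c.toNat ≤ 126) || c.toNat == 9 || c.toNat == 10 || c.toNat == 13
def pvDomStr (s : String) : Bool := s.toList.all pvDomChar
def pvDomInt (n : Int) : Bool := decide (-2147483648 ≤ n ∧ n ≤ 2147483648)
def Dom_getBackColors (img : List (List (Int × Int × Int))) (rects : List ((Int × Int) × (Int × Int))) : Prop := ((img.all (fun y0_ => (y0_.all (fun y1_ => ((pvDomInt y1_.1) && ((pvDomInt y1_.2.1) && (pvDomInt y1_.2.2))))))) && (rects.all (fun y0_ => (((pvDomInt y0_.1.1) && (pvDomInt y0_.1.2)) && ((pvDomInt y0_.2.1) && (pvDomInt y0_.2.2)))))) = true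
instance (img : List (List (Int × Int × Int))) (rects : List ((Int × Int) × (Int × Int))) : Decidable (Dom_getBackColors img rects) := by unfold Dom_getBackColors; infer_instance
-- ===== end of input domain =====

-- B drops A's precomputed covered_area set and tests each pixel's coverage on the fly
-- against the rectangles' inclusive bounds (objective: simpler).

-- ===== PORT A =====
-- A's covered_area, built by its first loop nest. Ported as Std.HashSet (Python's set IS a
-- hash set, so insertion cost matches); it is consumed only through membership tests, on
-- which a hash set is exact.
def pvCovered (rects : List ((Int × Int) × (Int × Int))) : Std.HashSet (Int × Int) :=
  rects.foldl (fun s rect =>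
    match rect with
    | ((x1, y1), (x2, y2)) =>
      (PySem.List.pyRange y1 (y2 + 1) 1).foldl (fun s y =>
        (PySem.List.pyRange x1 (x2 + 1) 1).foldl (fun s x => s.insert (x, y)) s) s)
    (∅ : Std.HashSet (Int × Int))

def getBackColors (img : List (List (Int × Int × Int))) (rects : List ((Int × Int) × (Int × Int))) : List (Int × Int × Int) :=
  let covered := pvCovered rects
  ((PySem.List.pyRange 0 img.length 1).foldl (fun d y =>
      let row := PySem.List.pyGetD img y []
      (PySem.List.pyRange 0 row.length 1).foldl (fun d x =>
        if !(covered.contains (x, y)) then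
          match PySem.List.pyGetD row x (0, 0, 0) with
          | (b, g, r) => d.insert (b, g, r) true
        else d) d)
    (PySem.Dict.empty : PySem.Dict (Int × Int × Int) Bool)).keys

-- ===== PORT B =====
def getBackColors_alt (img : List (List (Int × Int × Int))) (rects : List ((Int × Int) × (Int × Int))) : List (Int × Int × Int) :=
  ((PySem.List.pyRange 0 img.length 1).foldl (fun d y =>
      let row := PySem.List.pyGetD img y []
      (PySem.List.pyRange 0 row.length 1).foldl (fun d x =>
        if !(rects.any (fun rect => decide (rect.1.1 ≤ x ∧ x ≤ rect.2.1 ∧ rect.1.2 ≤ y ∧ y ≤ rect.2.2))) then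
          match PySem.List.pyGetD row x (0, 0, 0) with
          | (b, g, r) => d.insert (b, g, r) true
        else d) d)
    (PySem.Dict.empty : PySem.Dict (Int × Int × Int) Bool)).keys

-- ===== PRECONDITION & SPEC =====
def Spec_getBackColors (img : List (List (Int × Int × Int))) (rects : List ((Int × Int) × (Int × Int))) (out : List (Int × Int × Int)) : Prop := out = getBackColors_alt img rects
instance (img : List (List (Int × Int × Int))) (rects : List ((Int × Int) × (Int × Int))) (out : List (Int × Int × Int)) : Decidable (Spec_getBackColors img rects out) := by unfold Spec_getBackColors; infer_instance

-- ===== CLAIM (what is proved, stated in full; the proofs are below) =====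
def Claim_equal_getBackColors : Prop := ∀ (img : List (List (Int × Int × Int))) (rects : List ((Int × Int) × (Int × Int))), Dom_getBackColors img rects → Spec_getBackColors img rects (getBackColors img rects)

-- ===== LEMMAS AND PROOFS =====

-- membership after a fold whose step adds exactly the elements satisfying C x ·
theorem mem_foldl_iff {α σ β : Type} (P : σ → β → Prop) (C : α → β → Prop) (g : σ → α → σ)
    (h : ∀ s x p, P (g s x) p ↔ P s p ∨ C x p) (l : List α) (s : σ) (p : β) :
    P (l.foldl g s) p ↔ P s p ∨ ∃ x ∈ l, C x p := by
  induction l generalizing s with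
  | nil => simp
  | cons a t ih =>
    rw [List.foldl_cons, ih, h]
    simp only [List.mem_cons]
    constructor
    · rintro ((hs | hc) | ⟨x, hx, hcx⟩)
      · exact Or.inl hs
      · exact Or.inr ⟨a, Or.inl rfl, hc⟩
      · exact Or.inr ⟨x, Or.inr hx, hcx⟩
    · rintro (hs | ⟨x, (rfl | hx), hcx⟩)
      · exact Or.inl (Or.inl hs)
      · exact Or.inl (Or.inr hcx)
      · exact Or.inr ⟨x, hx, hcx⟩

theorem mem_covered (rects : List ((Int × Int) × (Int × Int))) (p : Int × Int) :
    p ∈ pvCovered rects ↔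
      ∃ r ∈ rects, r.1.1 ≤ p.1 ∧ p.1 ≤ r.2.1 ∧ r.1.2 ≤ p.2 ∧ p.2 ≤ r.2.2 := by
  unfold pvCovered
  rw [mem_foldl_iff (fun s q => q ∈ s) (fun r q => r.1.1 ≤ q.1 ∧ q.1 ≤ r.2.1 ∧ r.1.2 ≤ q.2 ∧ q.2 ≤ r.2.2)]
  · simp
  · intro s r q
    obtain ⟨⟨x1, y1⟩, x2, y2⟩ := r
    dsimp only
    rw [mem_foldl_iff (fun s q => q ∈ s) (fun y qq => qq.2 = y ∧ x1 ≤ qq.1 ∧ qq.1 ≤ x2)]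
    · constructor
      · rintro (hs | ⟨y, hy, rfl, hx⟩)
        · exact Or.inl hs
        · rw [PySem.List.mem_pyRange_one] at hy
          exact Or.inr ⟨hx.1, hx.2, hy.1, by omega⟩
      · rintro (hs | ⟨hx1, hx2, hy1, hy2⟩)
        · exact Or.inl hs
        · exact Or.inr ⟨q.2, by rw [PySem.List.mem_pyRange_one]; omega, rfl, hx1, hx2⟩
    · intro s y qq
      rw [mem_foldl_iff (fun s q => q ∈ s) (fun x qq => qq = (x, y))]
      · constructor
        · rintro (hs | ⟨x, hx, rfl⟩)
          · exact Or.inl hs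
          · rw [PySem.List.mem_pyRange_one] at hx
            exact Or.inr ⟨rfl, hx.1, by omega⟩
        · rintro (hs | ⟨h2, hx1, hx2⟩)
          · exact Or.inl hs
          · refine Or.inr ⟨qq.1, by rw [PySem.List.mem_pyRange_one]; omega, ?_⟩
            exact Prod.ext rfl h2
      · intro s x pp
        rw [Std.HashSet.mem_insert]
        simp only [beq_iff_eq]
        constructor
        · rintro (rfl | hs)
          · exact Or.inr rfl
          · exact Or.inl hs
        · rintro (hs | rfl)
          · exact Or.inr hs
          · exact Or.inl rfl

theorem foldl_funext {α β : Type} {f g : α → β → α} (h : ∀ a b, f a b = g a b) (l : List β) (init : α) :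
    l.foldl f init = l.foldl g init := by
  induction l generalizing init with
  | nil => rfl
  | cons a t ih => rw [List.foldl_cons, List.foldl_cons, h, ih]

theorem contains_covered (rects : List ((Int × Int) × (Int × Int))) (x y : Int) :
    (pvCovered rects).contains (x, y) =
      rects.any (fun rect => decide (rect.1.1 ≤ x ∧ x ≤ rect.2.1 ∧ rect.1.2 ≤ y ∧ y ≤ rect.2.2)) := by
  rw [Bool.eq_iff_iff, Std.HashSet.contains_iff_mem, mem_covered, List.any_eq_true]
  simp

-- ===== VERDICT (by name: the statement is the Claim_ definition above) =====
theorem getBackColors_spec : Claim_equal_getBackColors := by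
  intro img rects _
  show getBackColors img rects = getBackColors_alt img rects
  simp only [getBackColors, getBackColors_alt]
  congr 1
  apply foldl_funext
  intro d y
  dsimp only
  apply foldl_funext
  intro d x
  rw [contains_covered]
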